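-- pv_equiv track=rewrite | github.com/ninamacedos/Hamming-Code | Hamming_aprimor.py | colocar_quadros
-- ===== SOURCE A (Python) =====
-- def colocar_quadros(palavra, num_tabelas, bits_tabela):
--     tabelas = []
--     cont = 0
--     for x in range (num_tabelas):
--         lista = []
--         for y in range(bits_tabela):
--             if len(palavra) <= cont:
--                 lista.append("0")
--             else :
--                 lista.append(palavra[cont])
--             cont += 1
--         tabelas.append(lista)
--     return tabelas
-- ===== SOURCE B (Python) =====
-- def colocar_quadros(palavra, num_tabelas, bits_tabela):
--     bits = max(bits_tabela, 0)
--     padded = list(palavra) + ["0"] * (num_tabelas * bits - len(palavra))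
--     return [padded[i * bits:(i + 1) * bits] for i in range(num_tabelas)]
-- ===== Notes on version B (the rewrite author's own statement) =====
-- stated objective: simpler
-- what changed: Replaces the nested counter-driven copy-or-pad loops with a single batch pad of the word to the full num_tabelas*bits_tabela length followed by fixed-width slicing.
import Mathlib
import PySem

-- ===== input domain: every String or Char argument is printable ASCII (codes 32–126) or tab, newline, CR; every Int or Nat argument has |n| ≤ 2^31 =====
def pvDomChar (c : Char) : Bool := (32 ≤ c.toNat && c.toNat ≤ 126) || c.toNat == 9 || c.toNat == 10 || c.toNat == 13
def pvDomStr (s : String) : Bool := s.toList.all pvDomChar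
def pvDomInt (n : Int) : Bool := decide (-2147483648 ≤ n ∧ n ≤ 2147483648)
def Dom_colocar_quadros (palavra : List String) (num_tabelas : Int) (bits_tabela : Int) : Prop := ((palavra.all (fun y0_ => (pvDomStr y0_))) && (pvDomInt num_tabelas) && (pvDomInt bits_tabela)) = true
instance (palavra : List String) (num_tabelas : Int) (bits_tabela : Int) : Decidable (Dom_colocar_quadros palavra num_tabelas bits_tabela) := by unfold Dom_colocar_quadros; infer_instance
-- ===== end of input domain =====

-- B pads the word once to the full num_tabelas*bits_tabela length and slices it into
-- fixed-width chunks, replacing A's nested counter-driven copy-or-pad loop (objective: simpler).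


-- ===== PORT A =====
def colocar_quadros (palavra : List String) (num_tabelas : Int) (bits_tabela : Int) : List (List String) :=
  ((PySem.List.pyRange 0 num_tabelas 1).foldl
    (fun (st : List (List String) × Int) _ =>
      let r := (PySem.List.pyRange 0 bits_tabela 1).foldl
        (fun (s : List String × Int) _ =>
          (if (palavra.length : Int) ≤ s.2 then s.1 ++ ["0"]
           else s.1 ++ [PySem.List.pyGetD palavra s.2 "0"],  -- palavra[cont]: in range here, guarded by the branch
           s.2 + 1))
        ([], st.2)
      (st.1 ++ [r.1], r.2))
    ([], 0)).1

-- ===== PORT B =====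
def colocar_quadros_alt (palavra : List String) (num_tabelas : Int) (bits_tabela : Int) : List (List String) :=
  let bits := max bits_tabela 0
  let padded := palavra ++ List.replicate (num_tabelas * bits - (palavra.length : Int)).toNat "0"
  (PySem.List.pyRange 0 num_tabelas 1).map
    (fun i => PySem.List.slice padded (some (i * bits)) (some ((i + 1) * bits)))

-- ===== PRECONDITION & SPEC =====
def Spec_colocar_quadros (palavra : List String) (num_tabelas : Int) (bits_tabela : Int) (out : List (List String)) : Prop := out = colocar_quadros_alt palavra num_tabelas bits_tabela
instance (palavra : List String) (num_tabelas : Int) (bits_tabela : Int) (out : List (List String)) : Decidable (Spec_colocar_quadros palavra num_tabelas bits_tabela out) := by unfold Spec_colocar_quadros; infer_instance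

-- ===== CLAIM (what is proved, stated in full; the proofs are below) =====
def Claim_equal_colocar_quadros : Prop := ∀ (palavra : List String) (num_tabelas : Int) (bits_tabela : Int), Dom_colocar_quadros palavra num_tabelas bits_tabela → Spec_colocar_quadros palavra num_tabelas bits_tabela (colocar_quadros palavra num_tabelas bits_tabela)

-- ===== LEMMAS AND PROOFS =====

-- the bit A's inner loop emits at absolute position k
def pvElem (p : List String) (k : Nat) : String := if p.length ≤ k then "0" else p.getD k "0"

-- A's inner loop, started at counter c, appends the B' bits at positions c, c+1, …
theorem pvInnerA (p : List String) (B' : Nat) (lista : List String) (c : Nat) :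
    (List.range B').foldl
      (fun (s : List String × Int) (_ : Nat) =>
        (if (p.length : Int) ≤ s.2 then s.1 ++ ["0"]
         else s.1 ++ [PySem.List.pyGetD p s.2 "0"], s.2 + 1))
      (lista, (c : Int))
    = (lista ++ (List.range B').map (fun j => pvElem p (c + j)), ((c + B' : Nat) : Int)) := by
  induction B' with
  | zero => simp
  | succ m ih =>
    rw [List.range_succ, List.foldl_append, ih, List.map_append]
    simp only [List.foldl_cons, List.foldl_nil, List.map_cons, List.map_nil,
      PySem.List.pyGetD_natCast, Nat.cast_le, pvElem]
    rw [Prod.mk.injEq]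
    refine ⟨?_, by push_cast; ring⟩
    split_ifs <;> simp [List.append_assoc]

-- A's outer loop, started at counter c, appends the chunks beginning at c, c+B', …
theorem pvOuterA (p : List String) (B' N' : Nat) (tabelas : List (List String)) (c : Nat) :
    (List.range N').foldl
      (fun (st : List (List String) × Int) (_ : Nat) =>
        let r := (List.range B').foldl
          (fun (s : List String × Int) (_ : Nat) =>
            (if (p.length : Int) ≤ s.2 then s.1 ++ ["0"]
             else s.1 ++ [PySem.List.pyGetD p s.2 "0"], s.2 + 1))
          ([], st.2)
        (st.1 ++ [r.1], r.2))
      (tabelas, (c : Int))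
    = (tabelas ++ (List.range N').map
        (fun i => (List.range B').map (fun j => pvElem p (c + i * B' + j))),
       ((c + N' * B' : Nat) : Int)) := by
  induction N' generalizing tabelas c with
  | zero => simp
  | succ m ih =>
    rw [List.range_succ, List.foldl_append, ih, List.map_append]
    simp only [List.foldl_cons, List.foldl_nil, List.map_cons, List.map_nil]
    rw [pvInnerA]
    rw [Prod.mk.injEq]
    refine ⟨by simp [List.append_assoc], by push_cast; ring⟩

-- one slice of the padded word is exactly A's chunk
theorem pvSliceChunk (p : List String) (B' N' i : Nat) (hi : i < N') :
    (((p ++ List.replicate (N' * B' - p.length) "0").drop (i * B')).take B')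
    = (List.range B').map (fun j => pvElem p (i * B' + j)) := by
  have hlen : (p ++ List.replicate (N' * B' - p.length) "0").length = max p.length (N' * B') := by
    simp; omega
  have hbound : i * B' + B' ≤ N' * B' := by
    have : i + 1 ≤ N' := hi
    calc i * B' + B' = (i + 1) * B' := by ring
    _ ≤ N' * B' := Nat.mul_le_mul_right _ this
  apply List.ext_getElem
  · simp [hlen]; omega
  · intro j hj _
    have hj' : j < B' := by simp [hlen] at hj; omega
    have hidx : i * B' + j < (p ++ List.replicate (N' * B' - p.length) "0").length := by
      rw [hlen]; omega
    rw [List.getElem_take, List.getElem_drop]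
    rw [List.getElem_map, List.getElem_range]
    by_cases hp : i * B' + j < p.length
    · rw [List.getElem_append_left hp]
      simp [pvElem, Nat.not_le.mpr hp, List.getD, List.getElem?_eq_getElem hp]
    · rw [List.getElem_append_right (Nat.le_of_not_lt hp)]
      simp [pvElem, Nat.le_of_not_lt hp]

-- ===== VERDICT (by name: the statement is the Claim_ definition above) =====
theorem colocar_quadros_spec : Claim_equal_colocar_quadros := by
  intro p n b _
  show _ = _
  unfold colocar_quadros colocar_quadros_alt
  by_cases hn : n ≤ 0
  · rw [PySem.List.pyRange_one_eq_nil hn]; rfl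
  · rw [not_le] at hn
    have hN : n = ((n.toNat : Nat) : Int) := (Int.toNat_of_nonneg hn.le).symm
    have hB : max b 0 = ((b.toNat : Nat) : Int) := (Int.ofNat_toNat b).symm
    simp only [PySem.List.pyRange_one, Int.sub_zero, List.foldl_map, List.map_map]
    have houter := pvOuterA p b.toNat n.toNat [] 0
    simp only [Nat.cast_zero, Nat.zero_add, List.nil_append] at houter
    rw [houter]
    have hrep : (n * max b 0 - (p.length : Int)).toNat = n.toNat * b.toNat - p.length := by
      rw [hN, hB, ← Nat.cast_mul, Int.toNat_sub, Int.toNat_natCast]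
    rw [hrep]
    apply List.map_congr_left
    intro k hk
    have hk' : k < n.toNat := List.mem_range.mp hk
    rw [hB]
    simp only [Function.comp_apply]
    have h1 : ((0 : Int) + (k : Int)) * ((b.toNat : Nat) : Int) = ((k * b.toNat : Nat) : Int) := by
      push_cast; ring
    have h2 : ((0 : Int) + (k : Int) + 1) * ((b.toNat : Nat) : Int)
        = ((k * b.toNat : Nat) : Int) + ((b.toNat : Nat) : Int) := by
      push_cast; ring
    rw [h1, h2, PySem.List.slice_natCast_add, pvSliceChunk p b.toNat n.toNat k hk']
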